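-- pv_equiv track=rewrite | github.com/joyhpc/opendatasheet | extractors/protocol.py | _check_monotonicity
-- ===== SOURCE A (Python) =====
-- def _check_monotonicity(min_val, typ_val, max_val):
--     """Check that min <= typ <= max (where provided).
--
--     Returns True if monotonicity holds, False if violated.
--     Returns None if there are fewer than 2 values to compare.
--     """
--     vals = [(label, v) for label, v in [("min", min_val), ("typ", typ_val), ("max", max_val)]
--             if v is not None]
--     if len(vals) < 2:
--         return None
--     for i in range(len(vals) - 1):
--         if vals[i][1] > vals[i + 1][1]:
--             return False
--     return True
-- ===== SOURCE B (Python) =====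
-- def _check_monotonicity(min_val, typ_val, max_val):
--     """Check that min <= typ <= max (where provided)."""
--     vs = [v for v in (min_val, typ_val, max_val) if v is not None]
--     if len(vs) < 2:
--         return None
--     return vs == sorted(vs)
-- ===== Notes on version B (the rewrite author's own statement) =====
-- stated objective: simpler
-- what changed: B drops the (label, value) tuples and the explicit adjacent-pair scan with early return, instead collecting the bare present values and comparing the list with its sorted copy.
import Mathlib
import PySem

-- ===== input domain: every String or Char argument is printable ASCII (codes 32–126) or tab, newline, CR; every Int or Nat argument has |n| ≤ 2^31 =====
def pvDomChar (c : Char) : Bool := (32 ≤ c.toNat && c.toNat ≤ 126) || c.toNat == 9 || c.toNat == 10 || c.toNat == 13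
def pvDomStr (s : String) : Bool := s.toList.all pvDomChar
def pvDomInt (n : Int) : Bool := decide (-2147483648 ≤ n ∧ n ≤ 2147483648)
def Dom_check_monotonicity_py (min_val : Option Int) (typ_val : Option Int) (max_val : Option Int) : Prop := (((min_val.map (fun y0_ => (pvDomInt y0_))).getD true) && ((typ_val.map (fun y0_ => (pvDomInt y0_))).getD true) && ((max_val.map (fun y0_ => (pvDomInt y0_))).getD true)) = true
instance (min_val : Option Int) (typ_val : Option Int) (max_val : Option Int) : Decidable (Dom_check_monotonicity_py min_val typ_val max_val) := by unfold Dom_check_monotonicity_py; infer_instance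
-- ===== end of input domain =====

-- B: collect the present bare values and compare with a sorted copy, instead of the labelled-tuple list and adjacent-pair scan (simpler; same cost).


-- ===== PORT A =====
-- A's loop over range(len(vals)-1) with early return False
def pvALoop (vals : List (String × Int)) : List Int → Option Bool
  | [] => some true
  | i :: rest =>
    match PySem.List.pyGet? vals i, PySem.List.pyGet? vals (i + 1) with
    | some a, some b => if a.2 > b.2 then some false else pvALoop vals rest
    | _, _ => none

def check_monotonicity_py (min_val : Option Int) (typ_val : Option Int) (max_val : Option Int) : Option Bool :=
  let vals := [("min", min_val), ("typ", typ_val), ("max", max_val)].foldl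
    (fun acc p => match p.2 with | some v => acc ++ [(p.1, v)] | none => acc)
    ([] : List (String × Int))
  if vals.length < 2 then none
  else pvALoop vals (PySem.List.pyRange 0 (vals.length - 1) 1)

-- ===== PORT B =====
def check_monotonicity_py_alt (min_val : Option Int) (typ_val : Option Int) (max_val : Option Int) : Option Bool :=
  let vs := [min_val, typ_val, max_val].filterMap (fun v => v)
  if vs.length < 2 then none
  else some (vs == PySem.List.sorted vs (fun x => x) false)

-- ===== PRECONDITION & SPEC =====
def Spec_check_monotonicity_py (min_val : Option Int) (typ_val : Option Int) (max_val : Option Int) (out : Option Bool) : Prop := out = check_monotonicity_py_alt min_val typ_val max_val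
instance (min_val : Option Int) (typ_val : Option Int) (max_val : Option Int) (out : Option Bool) : Decidable (Spec_check_monotonicity_py min_val typ_val max_val out) := by unfold Spec_check_monotonicity_py; infer_instance

-- ===== CLAIM (what is proved, stated in full; the proofs are below) =====
def Claim_equal_check_monotonicity_py : Prop := ∀ (min_val : Option Int) (typ_val : Option Int) (max_val : Option Int), Dom_check_monotonicity_py min_val typ_val max_val → Spec_check_monotonicity_py min_val typ_val max_val (check_monotonicity_py min_val typ_val max_val)

-- ===== LEMMAS AND PROOFS =====

-- ===== VERDICT (by name: the statement is the Claim_ definition above) =====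
theorem check_monotonicity_py_spec : Claim_equal_check_monotonicity_py := by
  intro min_val typ_val max_val _
  unfold Spec_check_monotonicity_py check_monotonicity_py check_monotonicity_py_alt
  rcases min_val with _ | a <;> rcases typ_val with _ | b <;> rcases max_val with _ | c <;>
    simp [pvALoop, PySem.List.pyRange, PySem.List.pyGet?, PySem.List.pyIdx?,
          PySem.List.sorted, PySem.List.insertBy, List.filterMap, List.range_succ] <;>
    split_ifs <;> simp_all [PySem.List.insertBy] <;> (try split_ifs) <;> (try simp_all) <;> omega
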